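-- pv_equiv track=rewrite | github.com/theking465/building-AI | Ex7.py | count
-- ===== SOURCE A (Python) =====
-- def count(seq):
--     # insert code to return the number of occurrences of 11111 in the sequence
--     cor = 0
--     occ = 0
--     for i in seq:
--         if i is 1:
--             cor += 1
--         else:
--             cor = 0
--         if cor >= 5:
--             occ += 1
--
--     return occ
-- ===== SOURCE B (Python) =====
-- def count(seq):
--     # group-then-closed-form: scan maximal runs of 1s, each run of length L
--     # contributes max(0, L-4) windows of five consecutive 1s.
--     total = 0
--     i = 0
--     n = len(seq)
--     while i < n:
--         if seq[i] is 1: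
--             j = i
--             while j < n and seq[j] is 1:
--                 j += 1
--             total += max(0, (j - i) - 4)
--             i = j
--         else:
--             i += 1
--     return total
-- ===== Notes on version B (the rewrite author's own statement) =====
-- stated objective: alternative
-- what changed: Replaces the per-element running counter with a two-level scan over maximal runs of 1s, adding the closed form max(0, L-4) per run instead of incrementing occ once per qualifying position.
import Mathlib
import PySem

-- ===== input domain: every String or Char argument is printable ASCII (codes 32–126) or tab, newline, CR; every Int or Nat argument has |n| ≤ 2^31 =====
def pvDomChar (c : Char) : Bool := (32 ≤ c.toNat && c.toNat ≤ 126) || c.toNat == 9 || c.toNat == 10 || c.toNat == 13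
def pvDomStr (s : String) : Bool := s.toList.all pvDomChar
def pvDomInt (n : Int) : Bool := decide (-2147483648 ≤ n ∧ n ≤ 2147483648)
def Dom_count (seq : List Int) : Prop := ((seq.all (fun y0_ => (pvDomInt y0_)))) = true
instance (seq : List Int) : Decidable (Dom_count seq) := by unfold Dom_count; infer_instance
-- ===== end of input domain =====

-- B replaces A's per-element running counter with a scan over maximal runs of 1s,
-- each run of length L contributing max(0, L-4); same O(n) cost, different decomposition.

-- ===== PORT A =====
-- running counter cor of consecutive 1s, occ incremented at every position with cor ≥ 5
def count (seq : List Int) : Int :=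
  (seq.foldl (fun (st : Int × Int) i =>
      let cor : Int := if i = 1 then st.1 + 1 else 0
      (cor, if cor ≥ 5 then st.2 + 1 else st.2)) (0, 0)).2

-- ===== PORT B =====
-- outer while: skip a non-1 or consume the whole maximal run of 1s (inner while = takeWhile/dropWhile)
def count_alt : List Int → Int
  | [] => 0
  | x :: xs =>
    if x = 1 then
      max 0 ((((x :: xs).takeWhile (fun y => y == 1)).length : Int) - 4)
        + count_alt ((x :: xs).dropWhile (fun y => y == 1))
    else count_alt xs
termination_by l => l.length
decreasing_by
  · simp only [List.dropWhile_cons, show ((x == (1:Int)) = true) by simpa using ‹x = 1›]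
    exact Nat.lt_succ_of_le (List.length_dropWhile_le _ _)
  · simp

-- ===== PRECONDITION & SPEC =====
def Spec_count (seq : List Int) (out : Int) : Prop := out = count_alt seq
instance (seq : List Int) (out : Int) : Decidable (Spec_count seq out) := by unfold Spec_count; infer_instance

-- ===== CLAIM (what is proved, stated in full; the proofs are below) =====
def Claim_equal_count : Prop := ∀ (seq : List Int), Dom_count seq → Spec_count seq (count seq)

-- ===== LEMMAS AND PROOFS =====

-- A's result with the occ accumulator stripped: gAux c seq = occurrences added starting from cor = c
def gAux (c : Int) : List Int → Int
  | [] => 0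
  | x :: xs => if x = 1 then (if c + 1 ≥ 5 then 1 else 0) + gAux (c + 1) xs else gAux 0 xs

theorem foldl_eq_gAux (seq : List Int) : ∀ (c o : Int),
    (seq.foldl (fun (st : Int × Int) i =>
      let cor : Int := if i = 1 then st.1 + 1 else 0
      (cor, if cor ≥ 5 then st.2 + 1 else st.2)) (c, o)).2 = o + gAux c seq := by
  induction seq with
  | nil => intro c o; simp [gAux]
  | cons x xs ih =>
    intro c o
    by_cases hx : x = 1 <;> simp only [List.foldl_cons, gAux, hx, if_pos, ite_false]
    · by_cases h5 : c + 1 ≥ 5 <;> simp [h5, ih, Int.add_comm, Int.add_assoc, Int.add_left_comm]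
    · simp [ih, show ¬ ((0:Int) ≥ 5) by omega]

theorem gAux_run (rest : List Int) : ∀ (L : Nat) (c : Int), 0 ≤ c →
    gAux c (List.replicate L 1 ++ rest)
      = (max 0 (c + L - 4) - max 0 (c - 4)) + gAux (c + L) rest := by
  intro L
  induction L with
  | zero => intro c hc; simp
  | succ L ih =>
    intro c hc
    rw [List.replicate_succ, List.cons_append]
    show (if (1:Int) = 1 then (if c + 1 ≥ 5 then 1 else 0) + gAux (c + 1) (List.replicate L 1 ++ rest)
          else gAux 0 (List.replicate L 1 ++ rest)) = _
    rw [if_pos rfl, ih (c + 1) (by omega)]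
    have : c + 1 + (L : Int) = c + ((L : Nat) + 1 : Nat) := by push_cast; ring
    rw [this]
    by_cases h5 : c + 1 ≥ 5 <;> simp [h5] <;> omega

theorem gAux_dropWhile (l : List Int) (k : Int) :
    gAux k (l.dropWhile (fun y => y == 1)) = gAux 0 (l.dropWhile (fun y => y == 1)) := by
  induction l with
  | nil => simp [gAux]
  | cons x xs ih =>
    by_cases hx : x = 1
    · simp [hx, ih]
    · simp [hx, gAux]

theorem takeWhile_ones (l : List Int) :
    l.takeWhile (fun y => y == 1) = List.replicate (l.takeWhile (fun y => y == 1)).length 1 := by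
  rw [List.eq_replicate_iff]
  refine ⟨rfl, fun b hb => ?_⟩
  have := List.mem_takeWhile_imp hb
  simpa using this

theorem gAux_eq_alt : ∀ (n : Nat) (seq : List Int), seq.length ≤ n → gAux 0 seq = count_alt seq := by
  intro n
  induction n with
  | zero =>
    intro seq h
    have : seq = [] := List.eq_nil_of_length_eq_zero (Nat.le_zero.mp h)
    subst this; simp [gAux, count_alt]
  | succ n ih =>
    intro seq h
    match seq with
    | [] => simp [gAux, count_alt]
    | x :: xs =>
      by_cases hx : x = 1
      · have hdec : (x :: xs).dropWhile (fun y => y == 1) = xs.dropWhile (fun y => y == 1) := by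
          simp [hx]
        have hsplit : (x :: xs).takeWhile (fun y => y == 1) ++ (x :: xs).dropWhile (fun y => y == 1)
            = x :: xs := List.takeWhile_append_dropWhile
        set L := ((x :: xs).takeWhile (fun y => y == 1)).length with hL
        have h1 : gAux 0 (x :: xs) = gAux 0 (List.replicate L 1 ++ (x :: xs).dropWhile (fun y => y == 1)) := by
          conv_lhs => rw [← hsplit, takeWhile_ones]
        have h2 := gAux_run ((x :: xs).dropWhile (fun y => y == 1)) L 0 (le_refl 0)
        have h3 := gAux_dropWhile (x :: xs) ((0 : Int) + L)
        have hrest_len : ((x :: xs).dropWhile (fun y => y == 1)).length ≤ n := by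
          rw [hdec]
          exact le_trans (List.length_dropWhile_le _ _) (by simpa using Nat.lt_succ_iff.mp (Nat.lt_of_lt_of_le (Nat.lt_succ_of_le (le_refl _)) h))
        have h4 := ih _ hrest_len
        rw [h1, h2, h3, h4]
        rw [count_alt, if_pos hx, ← hL]
        omega
      · have h4 := ih xs (by simpa using Nat.lt_succ_iff.mp (Nat.lt_of_lt_of_le (Nat.lt_succ_of_le (le_refl _)) h))
        rw [count_alt, if_neg hx, ← h4]
        simp [gAux, hx]

-- ===== VERDICT (by name: the statement is the Claim_ definition above) =====
theorem count_spec : Claim_equal_count := by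
  intro seq _
  unfold Spec_count count
  rw [foldl_eq_gAux seq 0 0, gAux_eq_alt seq.length seq (le_refl _)]
  ring
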